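-- pv_equiv track=rewrite | github.com/mattarm555/discordBotGoogle2 | cogs/blackjack.py | format_hand_with_total
-- ===== SOURCE A (Python) =====
-- def card_value(card):
--     if card in ['J', 'Q', 'K']:
--         return 10
--     elif card == 'A':
--         return 11  # initially count as 11
--     else:
--         return int(card)
--
-- def hand_value(hand):
--     total = sum(card_value(card) for card in hand)
--     aces = sum(1 for card in hand if card == 'A')
--     while total > 21 and aces:
--         total -= 10
--         aces -= 1
--     return total
--
-- def format_hand(hand, hide_second=False):
--     """Format hand for display"""
--     display = []
--     for i, card in enumerate(hand):
--         if hide_second and i == 1: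
--             display.append("?")
--         else:
--             display.append(card)
--     return " ".join(display)
--
-- def format_hand_with_total(hand, hide_second=False, show_ace_values=True):
--     """Format hand with total and optionally show ace values"""
--     cards_display = format_hand(hand, hide_second)
--
--     if hide_second:
--         # Don't show total for hidden hands
--         return cards_display
--
--     total = hand_value(hand)
--
--     if show_ace_values:
--         # Show how aces are being counted
--         aces = sum(1 for card in hand if card == 'A')
--         if aces > 0:
--             # Calculate how many aces are used as 1 vs 11
--             temp_total = sum(card_value(card) for card in hand)
--             aces_as_one = 0
--             while temp_total > 21 and aces_as_one < aces:
--                 temp_total -= 10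
--                 aces_as_one += 1
--
--             if aces_as_one > 0:
--                 ace_info = f" (Aces: {aces - aces_as_one} as 11, {aces_as_one} as 1)"
--                 return f"{cards_display} - Total: {total}{ace_info}"
--
--     return f"{cards_display} - Total: {total}"
-- ===== SOURCE B (Python) =====
-- def format_hand_with_total(hand, hide_second=False, show_ace_values=True):
--     """Format hand with total and optionally show ace values"""
--     cards_display = " ".join("?" if hide_second and i == 1 else c
--                              for i, c in enumerate(hand))
--     if hide_second:
--         return cards_display
--     raw = 0
--     aces = 0
--     for c in hand:
--         if c in ('J', 'Q', 'K'):
--             raw += 10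
--         elif c == 'A':
--             raw += 11
--             aces += 1
--         else:
--             raw += int(c)
--     demote = min(aces, max(0, -(-(raw - 21) // 10)))
--     total = raw - 10 * demote
--     if show_ace_values and demote > 0:
--         return f"{cards_display} - Total: {total} (Aces: {aces - demote} as 11, {demote} as 1)"
--     return f"{cards_display} - Total: {total}"
-- ===== Notes on version B (the rewrite author's own statement) =====
-- stated objective: simpler
-- what changed: B builds the display by a comprehension, accumulates the raw total and ace count in one pass instead of three separate comprehensions, and replaces both of A's while-loop demotion searches by the closed form min(aces, max(0, ceil((raw-21)/10))).
import Mathlib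
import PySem

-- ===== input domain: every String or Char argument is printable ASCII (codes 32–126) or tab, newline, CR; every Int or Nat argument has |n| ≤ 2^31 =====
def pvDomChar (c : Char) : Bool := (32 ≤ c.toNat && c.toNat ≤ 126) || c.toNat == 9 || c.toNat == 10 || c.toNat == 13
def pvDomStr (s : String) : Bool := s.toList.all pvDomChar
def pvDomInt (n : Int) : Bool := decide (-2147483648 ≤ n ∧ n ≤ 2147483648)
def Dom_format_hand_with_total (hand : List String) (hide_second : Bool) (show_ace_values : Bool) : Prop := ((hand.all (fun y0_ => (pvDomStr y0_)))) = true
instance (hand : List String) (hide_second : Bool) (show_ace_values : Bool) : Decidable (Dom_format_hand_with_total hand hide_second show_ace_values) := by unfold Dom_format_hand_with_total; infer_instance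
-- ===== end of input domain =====

-- B replaces A's three scans and two while loops by one accumulating pass and a closed-form demotion count (objective: simpler).

-- ===== PORT A =====
-- card_value; none = ValueError (excluded by Pre_)
def pvCardValue? (card : String) : Option Int :=
  if card = "J" ∨ card = "Q" ∨ card = "K" then some 10
  else if card = "A" then some 11
  else PySem.Int.ofStr? card

-- one summand step of sum(card_value(card) for card in hand)
def pvStepA (acc : Option Int) (c : String) : Option Int :=
  acc.bind (fun s => (pvCardValue? c).map (s + ·))

-- sum(card_value(card) for card in hand); none if any card raises
def pvSum? (hand : List String) : Option Int :=
  hand.foldl pvStepA (some 0)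

-- while total > 21 and aces: total -= 10; aces -= 1
def pvHVLoop : Nat → Int → Int
  | 0, t => t
  | a + 1, t => if t > 21 then pvHVLoop a (t - 10) else t

-- while temp_total > 21 and aces_as_one < aces: temp_total -= 10; aces_as_one += 1  (returns aces_as_one)
def pvDemote : Nat → Int → Nat
  | 0, _ => 0
  | a + 1, t => if t > 21 then pvDemote a (t - 10) + 1 else 0

-- format_hand
def pvFormatHand (hand : List String) (hide_second : Bool) : String :=
  PySem.Str.join " "
    ((PySem.List.enumerate hand).foldl
      (fun acc ic => acc ++ [if hide_second && ic.1 == 1 then "?" else ic.2]) [])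

def format_hand_with_total (hand : List String) (hide_second : Bool) (show_ace_values : Bool) : String :=
  let cards_display := pvFormatHand hand hide_second
  if hide_second then cards_display
  else
    match pvSum? hand with
    | none => ""  -- Python raises ValueError here; excluded by Pre_
    | some s =>
      let aces := hand.countP (· == "A")
      let total := pvHVLoop aces s
      if show_ace_values && decide (aces > 0) then
        let aces_as_one := pvDemote aces s
        if aces_as_one > 0 then
          cards_display ++ " - Total: " ++ PySem.Int.toStr total ++
            " (Aces: " ++ PySem.Int.toStr ((aces : Int) - (aces_as_one : Int)) ++ " as 11, " ++
            PySem.Int.toStr (aces_as_one : Int) ++ " as 1)"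
        else cards_display ++ " - Total: " ++ PySem.Int.toStr total
      else cards_display ++ " - Total: " ++ PySem.Int.toStr total

-- ===== PORT B =====
-- single pass accumulating (raw, aces); none = ValueError on int(c) (excluded by Pre_)
def pvStepB (acc : Option (Int × Int)) (c : String) : Option (Int × Int) :=
  acc.bind (fun ra =>
    if c = "J" ∨ c = "Q" ∨ c = "K" then some (ra.1 + 10, ra.2)
    else if c = "A" then some (ra.1 + 11, ra.2 + 1)
    else (PySem.Int.ofStr? c).map (fun v => (ra.1 + v, ra.2)))

def pvScan? (hand : List String) : Option (Int × Int) :=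
  hand.foldl pvStepB (some (0, 0))

def format_hand_with_total_alt (hand : List String) (hide_second : Bool) (show_ace_values : Bool) : String :=
  let cards_display := PySem.Str.join " "
    ((PySem.List.enumerate hand).map (fun ic => if hide_second && ic.1 == 1 then "?" else ic.2))
  if hide_second then cards_display
  else
    match pvScan? hand with
    | none => ""  -- Python raises ValueError here; excluded by Pre_
    | some ra =>
      let demote := min ra.2 (max 0 (-(PySem.Int.floordiv (-(ra.1 - 21)) 10)))
      let total := ra.1 - 10 * demote
      if show_ace_values && decide (demote > 0) then
        cards_display ++ " - Total: " ++ PySem.Int.toStr total ++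
          " (Aces: " ++ PySem.Int.toStr (ra.2 - demote) ++ " as 11, " ++
          PySem.Int.toStr demote ++ " as 1)"
      else cards_display ++ " - Total: " ++ PySem.Int.toStr total

-- ===== PRECONDITION & SPEC =====
-- Pre_ excludes exactly the inputs where A (and B) raise ValueError: the total is computed
-- (not hide_second) and some card is neither a face card / ace nor an int()-parsable string.
def Pre_format_hand_with_total (hand : List String) (hide_second : Bool) (show_ace_values : Bool) : Prop :=
  hide_second = true ∨
  ∀ c ∈ hand, c = "J" ∨ c = "Q" ∨ c = "K" ∨ c = "A" ∨ (PySem.Int.ofStr? c).isSome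

instance (hand : List String) (hide_second : Bool) (show_ace_values : Bool) : Decidable (Pre_format_hand_with_total hand hide_second show_ace_values) := by unfold Pre_format_hand_with_total; infer_instance

def pvWitness_format_hand_with_total : List String × Bool × Bool := (["A", "K", "9", "A"], false, true)

def Spec_format_hand_with_total (hand : List String) (hide_second : Bool) (show_ace_values : Bool) (out : String) : Prop := out = format_hand_with_total_alt hand hide_second show_ace_values
instance (hand : List String) (hide_second : Bool) (show_ace_values : Bool) (out : String) : Decidable (Spec_format_hand_with_total hand hide_second show_ace_values out) := by unfold Spec_format_hand_with_total; infer_instance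

-- ===== CLAIM (what is proved, stated in full; the proofs are below) =====
def Claim_equal_format_hand_with_total : Prop := ∀ (hand : List String) (hide_second : Bool) (show_ace_values : Bool), Dom_format_hand_with_total hand hide_second show_ace_values → Pre_format_hand_with_total hand hide_second show_ace_values → Spec_format_hand_with_total hand hide_second show_ace_values (format_hand_with_total hand hide_second show_ace_values)

-- ===== LEMMAS AND PROOFS =====

-- the display strings agree (fold-append vs map)
theorem pvDisplay_eq (hand : List String) (hide_second : Bool) :
    pvFormatHand hand hide_second =
      PySem.Str.join " "
        ((PySem.List.enumerate hand).map (fun ic => if hide_second && ic.1 == 1 then "?" else ic.2)) := by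
  unfold pvFormatHand
  congr 1
  generalize PySem.List.enumerate hand = l
  suffices h : ∀ (l : List (Int × String)) (acc : List String),
      l.foldl (fun acc ic => acc ++ [if hide_second && ic.1 == 1 then "?" else ic.2]) acc
        = acc ++ l.map (fun ic => if hide_second && ic.1 == 1 then "?" else ic.2) by
    rw [h l []]; simp
  intro l
  induction l with
  | nil => intro acc; simp
  | cons x xs ih =>
    intro acc
    rw [List.foldl_cons, ih, List.map_cons]
    simp

-- folds from a dead accumulator stay dead
theorem pvFoldA_none (l : List String) : l.foldl pvStepA none = none := by
  induction l with
  | nil => rfl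
  | cons x xs ih => simpa [List.foldl_cons, pvStepA] using ih

theorem pvFoldB_none (l : List String) : l.foldl pvStepB none = none := by
  induction l with
  | nil => rfl
  | cons x xs ih => simpa [List.foldl_cons, pvStepB] using ih

-- B's single scan computes A's sum together with A's ace count
theorem pvScan_aux (l : List String) : ∀ (s c : Int),
    l.foldl pvStepB (some (s, c))
      = (l.foldl pvStepA (some s)).map
          (fun t => (t, c + ((l.countP (· == "A") : Nat) : Int))) := by
  induction l with
  | nil => intro s c; simp
  | cons x xs ih =>
    intro s c
    rw [List.foldl_cons, List.foldl_cons]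
    by_cases hjqk : x = "J" ∨ x = "Q" ∨ x = "K"
    · have hA : ¬ x = "A" := by rcases hjqk with h | h | h <;> subst h <;> decide
      have hsB : pvStepB (some (s, c)) x = some (s + 10, c) := by
        simp [pvStepB, hjqk]
      have hsA : pvStepA (some s) x = some (s + 10) := by
        simp [pvStepA, pvCardValue?, hjqk]
      rw [hsB, hsA, ih]
      simp [List.countP_cons, hA]
    · by_cases hA : x = "A"
      · subst hA
        have hsB : pvStepB (some (s, c)) "A" = some (s + 11, c + 1) := by
          simp [pvStepB, hjqk]
        have hsA : pvStepA (some s) "A" = some (s + 11) := by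
          simp [pvStepA, pvCardValue?, hjqk]
        rw [hsB, hsA, ih]
        congr 1
        funext t
        simp [List.countP_cons]
        push_cast
        ring
      · have hAb : (x == "A") = false := by simp [hA]
        cases hv : PySem.Int.ofStr? x with
        | none =>
          have hsB : pvStepB (some (s, c)) x = none := by
            simp [pvStepB, hjqk, hA, hv]
          have hsA : pvStepA (some s) x = none := by
            simp [pvStepA, pvCardValue?, hjqk, hA, hv]
          rw [hsB, hsA, pvFoldA_none, pvFoldB_none]
          simp
        | some v =>
          have hsB : pvStepB (some (s, c)) x = some (s + v, c) := by
            simp [pvStepB, hjqk, hA, hv]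
          have hsA : pvStepA (some s) x = some (s + v) := by
            simp [pvStepA, pvCardValue?, hjqk, hA, hv]
          rw [hsB, hsA, ih]
          simp [List.countP_cons, hAb]

theorem pvScan_eq (hand : List String) :
    pvScan? hand = (pvSum? hand).map (fun s => (s, ((hand.countP (· == "A") : Nat) : Int))) := by
  have := pvScan_aux hand 0 0
  simpa [pvScan?, pvSum?] using this

-- demotion loop = closed form, capped at the ace count
theorem pvDemote_closed (a : Nat) : ∀ t : Int,
    ((pvDemote a t : Nat) : Int) = min (a : Int) (max 0 (-(PySem.Int.floordiv (-(t - 21)) 10))) := by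
  induction a with
  | zero =>
    intro t
    simp only [pvDemote, Nat.cast_zero]
    omega
  | succ n ih =>
    intro t
    rw [PySem.Int.floordiv_eq_ediv_of_pos (by omega)]
    by_cases h : t > 21
    · have h1 := ih (t - 10)
      rw [PySem.Int.floordiv_eq_ediv_of_pos (by omega)] at h1
      simp only [pvDemote, if_pos h] at *
      push_cast at *
      omega
    · simp only [pvDemote, if_neg h, Nat.cast_zero]
      omega

-- hand_value loop in terms of the demotion count
theorem pvHVLoop_eq (a : Nat) : ∀ t : Int,
    pvHVLoop a t = t - 10 * ((pvDemote a t : Nat) : Int) := by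
  induction a with
  | zero => intro t; simp [pvHVLoop, pvDemote]
  | succ n ih =>
    intro t
    by_cases h : t > 21
    · simp only [pvHVLoop, pvDemote, if_pos h, ih]; push_cast; ring
    · simp [pvHVLoop, pvDemote, h]

-- under Pre_, the sum does not raise
theorem pvSum_isSome (hand : List String)
    (h : ∀ c ∈ hand, c = "J" ∨ c = "Q" ∨ c = "K" ∨ c = "A" ∨ (PySem.Int.ofStr? c).isSome) :
    (pvSum? hand).isSome := by
  have hcv : ∀ c ∈ hand, (pvCardValue? c).isSome := by
    intro c hc
    rcases h c hc with h1 | h1 | h1 | h1 | h1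
    · subst h1; decide
    · subst h1; decide
    · subst h1; decide
    · subst h1; decide
    · unfold pvCardValue?
      split
      · simp
      · split
        · simp
        · exact h1
  unfold pvSum?
  suffices haux : ∀ (l : List String), (∀ c ∈ l, (pvCardValue? c).isSome) → ∀ s : Int,
      (l.foldl pvStepA (some s)).isSome by
    exact haux hand hcv 0
  intro l hl
  induction l with
  | nil => intro s; simp
  | cons x xs ih =>
    intro s
    have hx := hl x (by simp)
    obtain ⟨v, hv⟩ := Option.isSome_iff_exists.mp hx
    have hstep : pvStepA (some s) x = some (s + v) := by simp [pvStepA, hv]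
    rw [List.foldl_cons, hstep]
    exact ih (fun c hc => hl c (by simp [hc])) _

-- ===== VERDICT (by name: the statement is the Claim_ definition above) =====
theorem format_hand_with_total_spec : Claim_equal_format_hand_with_total := by
  intro hand hide_second show_ace_values _ hpre
  unfold Spec_format_hand_with_total format_hand_with_total format_hand_with_total_alt
  rw [pvDisplay_eq]
  cases hide_second with
  | true => simp
  | false =>
    simp only [if_neg (Bool.false_ne_true)]
    have hsum : (pvSum? hand).isSome := by
      rcases hpre with h | h
      · exact absurd h Bool.false_ne_true
      · exact pvSum_isSome hand h
    obtain ⟨s, hs⟩ := Option.isSome_iff_exists.mp hsum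
    have hscan := pvScan_eq hand
    rw [hs] at hscan
    simp only [Option.map_some] at hscan
    rw [hs, hscan]
    generalize hand.countP (· == "A") = a
    have hclosed := pvDemote_closed a s
    simp only [← hclosed, pvHVLoop_eq a s]
    rcases Nat.eq_zero_or_pos (pvDemote a s) with hk0 | hkpos
    · simp [hk0]
    · have hapos : 0 < a := by
        rcases a with _ | n
        · simp [pvDemote] at hkpos
        · omega
      have h2 : (0 : Int) < ((pvDemote a s : Nat) : Int) := by exact_mod_cast hkpos
      cases show_ace_values with
      | false => simp
      | true => simp [hapos, hkpos, h2]
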